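/- GENERATED by mk_final_copies.py from the proof of the farm's unit `sift_down` (farm:sift_down.1: Proof.lean) as the
   re-elaboration sweep compiled it — do not edit. -/
import Asan.CheckWalk
import Vorbis.Spec.Units.sift_down
import Vorbis.Spec.Worked.sift_down_Lemmas

open X86 X86.User Asan Vorbis Vorbis.Spec Vorbis.Spec.sift_down

set_option maxRecDepth 4000
set_option maxHeartbeats 4000000

/-- `sift_down(base, root, end, w, cmp)` satisfies its contract, whatever the comparison function `cmp` answers.
The shape of the proof:
  * entry … loop head 0x101354 (libc.c:71): six pushes, `sub rsp, 18H`, `cmp` spilled at `[rsp + 8]`;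
  * the loop (`u_loop`, ghost `i = root`, measure `end − root`); the invariant's memory part is `MemInv` (Lemmas.lean), carried
    over each of the three calls by `MemInv.step`;
  * the body is cut once more at `cmpSite` = 0x101321 (libc.c:80), where the three paths that have chosen `child` meet
    (`ReachVia.trans` with the assertion `AtCmp`): FIRST from the loop head to `cmpSite` (the exit `child ≥ end`; `child + 1 ≥ end`;
    the indirect call `cmp(child, child + 1)` at 0x101382 and its two answers), THEN from `cmpSite` on (the indirect call
    `cmp(root, child)` at 0x10133d; return, or `swap_bytes` at 0x10134c and the back edge 0x101351 with `root := child > root`). -/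
theorem Vorbis.Spec.Worked.sift_down_ok : Vorbis.Spec.sift_down.Statement := by
  intro Lay hLay μ hμ u₀ hcode hswap others frames cmp w hcmp u ret he hpre
  v_entry he
  obtain ⟨hsh, hr8, hrcx, hw, hroot, hlt63, hlive⟩ := hpre
  have hlt := hcmp.lt
  have hsp := hsh.rsp
  have hn63 : (u.reg .rdx).toNat < 2 ^ 63 := count_lt hw hlt63
  -- where the array is: one arithmetic fact
  have hwhere : (u.reg .rdx).toNat = 0 ∨
      (0x119d40 ≤ (u.reg .rdi).toNat ∧ (u.reg .rdi).toNat + w * (u.reg .rdx).toNat ≤ 0xC00000 ∧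
        ((u.reg .rsp).toNat + 8 ≤ (u.reg .rdi).toNat ∨ (u.reg .rdi).toNat + w * (u.reg .rdx).toNat ≤ 0x700000 ∨
          0x800000 ≤ (u.reg .rdi).toNat)) := by
    by_cases hn : (u.reg .rdx).toNat = 0
    · exact Or.inl hn
    · exact Or.inr (hlive.where_ hsh.inv hsh.offText (Nat.mul_pos hw (by omega)))
  -- 0x101300 … 0x10131f (libc.c:69): the prologue, up to the loop head
  u_walk hcode [hμ.vendor] until [Vorbis.L.sift_down.loop1] span [Vorbis.L.textLo, Vorbis.L.textHi] side (v_side)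
  -- THE LOOP HEAD 0x101354 (libc.c:71 `size_t child = 2 * root + 1;`): rbx = root = i ≤ end, the memory invariant, DF, MXCSR
  obtain ⟨i, hi, hile⟩ : ∃ i : Nat, s_10131f.reg .rbx = UInt64.ofNat i ∧ i ≤ (u.reg .rdx).toNat :=
    ⟨(u.reg .rsi).toNat, by rw [w_rbx, UInt64.ofNat_toNat], hroot⟩
  have hm : MemInv u ret cmp w s_10131f.mem := by
    refine ⟨?_, ?_, ?_, ?_, ?_, ?_, ?_, ?_, ?_, ?_, ?_⟩
    · u_same
    · v_untouched
    · intro k hk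
      obtain ⟨hw1, hw2, hw3⟩ := hwhere.resolve_left (by omega)
      refine RecordsKept.of_eqOn (by omega) ?_ k hk
      rw [w_mem]
      u_eqon
    · u_resolve
    · u_resolve
    · u_resolve
    · u_resolve
    · u_resolve
    · u_resolve
    · u_resolve
    · u_resolve
  have hdf : s_10131f.flags .df = false := by
    rw [w_flags]
    simp only [X86.User.df_setStatus]
    exact he_df
  replace w_kept := w_kept.mono_all (S' := [.rbx, .rbp, .r12, .r13, .r14, .r15, .rsp, .rax, .rcx, .rdx, .rsi, .rdi, .r8, .r9, .r10, .r11,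
    .r16, .r17, .r18, .r19, .r20, .r21, .r22, .r23, .r24, .r25, .r26, .r27, .r28, .r29, .r30, .r31]) (by rfl)
  have hmx : s_10131f.mxcsr &&& 0x1F80 = 0x1F80 := by
    rw [w_mxcsr]
    exact he_mx
  clear w_mem w_flags w_rbx w_mxcsr hwhere
  u_loop [i] (fun v => (u.reg .rdx).toNat - (v.reg .rbx).toNat)
  have ⟨hsame, hun, hrk, hs0, hs1, hs2, hs3, hs4, hs5, hs6, hs8⟩ := hm
  -- the body, cut at `cmpSite` (0x101321, libc.c:80): returned already, or there with `child = c ∈ {2i+1, 2i+2}`, `c < end`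
  refine ReachVia.trans (P := fun v => Returned (conv u₀) (sift_down.spec others frames cmp w) u ret v ∨
    ∃ c, (c = 2 * i + 1 ∨ c = 2 * i + 2) ∧ c < (u.reg .rdx).toNat ∧ AtCmp u₀ u ret cmp w i c v) ?_ ?_
  · -- FIRST PART: 0x101354 … `cmpSite` (libc.c:71–77)
    u_walk hcode [hμ.vendor] until [Vorbis.L.sift_down.loop1, Vorbis.L.swap_bytes.entry, cmpSite] span [Vorbis.L.textLo, Vorbis.L.textHi] side (v_side)
    · -- 0x10135c `jae` taken (libc.c:72 `child >= end`): 0x10138d … 0x10139b `ret`; nothing was written in this round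
      refine ReachVia.done (Or.inl ?_)
      refine X86.User.Returned.mk w_rip w_rsp ?_ ?_ (Vorbis.conv_code_in w_eq) ?_ ?_
      · u_saved
      · simp only [X86.User.Spec.footprint, vspec]
        u_same
      · exact abi_of_status w_flags hdf w_mxcsr hmx
      · refine ⟨?_, ?_⟩
        · rw [w_mem]
          exact hun
        · rw [w_mem]
          exact hrk
    · -- 0x101369 `jae` taken (libc.c:75 `child + 1 >= end`): at `cmpSite` with child = 2·i + 1
      have hc : 2 * i + 1 < (u.reg .rdx).toNat := child1_lt hile hn63 hbr_10135c
      refine ReachVia.done (Or.inr ⟨2 * i + 1, Or.inl rfl, hc, ?_⟩)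
      refine ⟨w_rip, w_rbx, w_r12.trans (ofNat_child1 i), w_r13, w_r14, w_r15, w_rsp, w_kept.mono_all (by rfl), ?_, ?_, ?_, w_eq⟩
      · rw [w_mem]
        exact hm
      · exact df_of_status w_flags hdf
      · exact mx_of_eq w_mxcsr hmx
    · -- 0x101382 `call rax` (libc.c:76 `cmp(base + child * width, base + (child + 1) * width)`), both indices `< end`
      have hc : 2 * i + 2 < (u.reg .rdx).toNat := child2_lt (child1_lt hile hn63 hbr_10135c) hn63 hbr_101369
      obtain ⟨hw1, hw2, hw3⟩ := hlive.where_ hsh.inv hsh.offText (Nat.mul_pos hw (by omega))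
      u_call hcmp.calls at 0x101382 side (v_side)
      · -- call_inv
        exact abi_of_status w_flags hdf w_mxcsr hmx
      · -- pre_101382: the layer below the new stack pointer; the two records are live
        have hun' : ShadowUntouched u.mem s_101382.mem := by v_untouched
        have ha : (s_101382.reg .rdi).toNat = (u.reg .rdi).toNat + w * (2 * i + 1) := by
          rw [w_rdi, ofNat_child1]
          exact record_addr (n := (u.reg .rdx).toNat) _ _ hrcx (by omega) (UInt64.toNat_lt _) (by omega)
        have hb : (s_101382.reg .rsi).toNat = (u.reg .rdi).toNat + w * (2 * i + 2) := by
          rw [w_rsi, addr_child2]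
          exact record_addr (n := (u.reg .rdx).toNat) _ _ hrcx hc (UInt64.toNat_lt _) (by omega)
        refine ⟨⟨?_, hsh.offText⟩, live_record hlive (by omega) ha, live_record hlive hc hb⟩
        rw [w_rsp]
        exact (hsh.inv.untouched hun').lower (by u_omega) (by u_omega) (by u_omega)
      -- 0x101384 (cut4), after the return of `cmp`: only its 48 bytes of stack below ours were written
      have w_eq := Vorbis.conv_code_eqOn w_code
      simp only [X86.User.Spec.footprint, vspec, w_rsp_101382] at w_same
      rw [w_mem_101382] at w_same
      have hm' : MemInv u ret cmp w s_101382r.mem := by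
        refine hm.step he_room he_top ?_ ?_ ?_ ?_
        · u_eqon
        · u_same
        · have h1 : ShadowUntouched s_10131f.mem s_101382.mem := by v_untouched
          exact Mem.EqOn.trans h1 w_post
        · refine RecordsKept.of_eqOn (by omega) ?_
          u_eqon
      have hdf' : s_101382r.flags .df = false := (show abiInv _ from w_inv).1
      have hmx' : s_101382r.mxcsr &&& 0x1F80 = 0x1F80 := (show abiInv _ from w_inv).2
      have ⟨hsame', hun', hrk', hs0', hs1', hs2', hs3', hs4', hs5', hs6', hs8'⟩ := hm'
      u_walk hcode [hμ.vendor] until [Vorbis.L.sift_down.loop1, Vorbis.L.swap_bytes.entry, cmpSite] span [Vorbis.L.textLo, Vorbis.L.textHi] side (v_side)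
      · -- 0x101386 `jns` taken (libc.c:76 `cmp(…) >= 0`): at `cmpSite`, child stays 2·i + 1
        refine ReachVia.done (Or.inr ⟨2 * i + 1, Or.inl rfl, by omega, ?_⟩)
        refine ⟨w_rip, w_rbx, w_r12.trans (ofNat_child1 i), w_r13, w_r14, w_r15, w_rsp, w_kept.mono_all (by rfl), ?_, ?_, ?_, w_eq⟩
        · rw [w_mem]
          exact hm'
        · exact df_of_status w_flags hdf'
        · exact mx_of_eq w_mxcsr hmx'
      · -- 0x101388 … 0x10138b (libc.c:77 `child = child + 1;`): at `cmpSite` with child = 2·i + 2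
        refine ReachVia.done (Or.inr ⟨2 * i + 2, Or.inr rfl, hc, ?_⟩)
        refine ⟨w_rip, w_rbx, w_r12.trans (ofNat_child2 i), w_r13, w_r14, w_r15, w_rsp, w_kept.mono_all (by rfl), ?_, ?_, ?_, w_eq⟩
        · rw [w_mem]
          exact hm'
        · exact df_of_status w_flags hdf'
        · exact mx_of_eq w_mxcsr hmx'
  · -- SECOND PART: from `cmpSite` 0x101321 on (libc.c:80–84): `cmp(root, child)`, then return, or swap and go round
    intro v hv
    rcases hv with hret | ⟨c, hc12, hcn, hat⟩
    · exact ReachVia.done (Or.inl hret)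
    clear hm hsame hun hrk hs0 hs1 hs2 hs3 hs4 hs5 hs6 hs8 hdf hmx w_rip w_r13 w_r14 w_r15 w_rsp w_kept w_eq
    obtain ⟨w_rip, w_rbx, w_r12, w_r13, w_r14, w_r15, w_rsp, w_kept, hm, hdf, hmx, w_eq⟩ := hat
    have ⟨hsame, hun, hrk, hs0, hs1, hs2, hs3, hs4, hs5, hs6, hs8⟩ := hm
    have hic : i < c := by omega
    obtain ⟨hw1, hw2, hw3⟩ := hlive.where_ hsh.inv hsh.offText (Nat.mul_pos hw (by omega))
    u_walk hcode [hμ.vendor] until [Vorbis.L.sift_down.loop1, Vorbis.L.swap_bytes.entry] span [Vorbis.L.textLo, Vorbis.L.textHi] side (v_side)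
    -- 0x10133d `call rax` (libc.c:80 `cmp(base + root * width, base + child * width)`): the two addresses, as numbers
    have hci : i < (u.reg .rdx).toNat := by omega
    have ha : (s_10133d.reg .rdi).toNat = (u.reg .rdi).toNat + w * i := by
      rw [w_rdi]
      exact record_addr (n := (u.reg .rdx).toNat) _ _ hrcx hci (UInt64.toNat_lt _) (by omega)
    have hb : (s_10133d.reg .rsi).toNat = (u.reg .rdi).toNat + w * c := by
      rw [w_rsi]
      exact record_addr (n := (u.reg .rdx).toNat) _ _ hrcx hcn (UInt64.toNat_lt _) (by omega)
    u_call hcmp.calls at 0x10133d side (v_side)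
    · -- call_inv
      exact abi_of_status w_flags hdf w_mxcsr hmx
    · -- pre_10133d
      have hun' : ShadowUntouched u.mem s_10133d.mem := by v_untouched
      refine ⟨⟨?_, hsh.offText⟩, live_record hlive hci ha, live_record hlive hcn hb⟩
      rw [w_rsp]
      exact (hsh.inv.untouched hun').lower (by u_omega) (by u_omega) (by u_omega)
    -- 0x10133f (cut1), after the return of `cmp`: only its 48 bytes of stack below ours were written
    have w_eq := Vorbis.conv_code_eqOn w_code
    simp only [X86.User.Spec.footprint, vspec, w_rsp_10133d] at w_same
    rw [w_mem_10133d] at w_same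
    have hm' : MemInv u ret cmp w s_10133dr.mem := by
      refine hm.step he_room he_top ?_ ?_ ?_ ?_
      · u_eqon
      · u_same
      · have h1 : ShadowUntouched v.mem s_10133d.mem := by v_untouched
        exact Mem.EqOn.trans h1 w_post
      · refine RecordsKept.of_eqOn (by omega) ?_
        u_eqon
    have hdf' : s_10133dr.flags .df = false := (show abiInv _ from w_inv).1
    have hmx' : s_10133dr.mxcsr &&& 0x1F80 = 0x1F80 := (show abiInv _ from w_inv).2
    have ⟨hsame', hun', hrk', hs0', hs1', hs2', hs3', hs4', hs5', hs6', hs8'⟩ := hm'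
    u_walk hcode [hμ.vendor] until [Vorbis.L.sift_down.loop1, Vorbis.L.swap_bytes.entry] span [Vorbis.L.textLo, Vorbis.L.textHi] side (v_side)
    · -- 0x101341 `jns` taken: `cmp(...) >= 0`, return (0x10138d … 0x10139b)
      refine ReachVia.done (Or.inl ?_)
      refine X86.User.Returned.mk w_rip w_rsp ?_ ?_ (Vorbis.conv_code_in w_eq) ?_ ?_
      · u_saved
      · simp only [X86.User.Spec.footprint, vspec]
        u_same
      · exact abi_of_status w_flags hdf' w_mxcsr hmx'
      · refine ⟨?_, ?_⟩
        · rw [w_mem]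
          exact hun'
        · rw [w_mem]
          exact hrk'
    · -- 0x10134c `call swap_bytes` (libc.c:83; the walk stopped at its entry): records `i < c` of the array, apart
      have hri : w * i + w ≤ w * (u.reg .rdx).toNat := record_inside hci
      have hrc : w * c + w ≤ w * (u.reg .rdx).toNat := record_inside hcn
      have hdx : (s_10134c.reg .rdx).toNat = w := by
        rw [w_rdx]
        exact hrcx
      have ha2 : (s_10134c.reg .rdi).toNat = (u.reg .rdi).toNat + w * i := by
        rw [w_rdi, ← w_rdi_10133d]
        exact ha
      have hb2 : (s_10134c.reg .rsi).toNat = (u.reg .rdi).toNat + w * c := by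
        rw [w_rsi, ← w_rsi_10133d]
        exact hb
      u_call (hswap others frames) at 0x10134c side (v_side)
      · -- call_inv
        exact abi_of_status w_flags hdf' w_mxcsr hmx'
      · -- pre_10134c
        have hun2 : ShadowUntouched u.mem s_10134c.mem := by v_untouched
        refine ⟨⟨?_, hsh.offText⟩, ?_, ?_, ?_⟩
        · rw [w_rsp]
          exact (hsh.inv.untouched hun2).lower (by u_omega) (by u_omega) (by u_omega)
        · rw [hdx]
          exact live_record hlive hci ha2
        · rw [hdx]
          exact live_record hlive hcn hb2
        · rw [hdx, ha2, hb2]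
          have := RecordsKept.records_apart (w := w) (Nat.ne_of_lt hic)
          omega
      -- 0x101351 (cut2, libc.c:84 `root = child;`), after the return of `swap_bytes`: records `i` and `c` exchanged
      have w_eq := Vorbis.conv_code_eqOn w_code
      obtain ⟨hpost_un, hpost_ab, hpost_ba⟩ := w_post
      rw [hdx] at hpost_ab hpost_ba
      simp only [X86.User.Spec.footprint, vspec, w_rsp_10134c, hdx] at w_same
      have hrk2 : RecordsKept s_10134c.mem s_10134cr.mem (u.reg .rdi).toNat w (u.reg .rdx).toNat := by
        refine RecordsKept.of_swap_bytes hci hcn ha2 hb2 (by omega) hpost_ab hpost_ba w_same ?_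
        show (u.reg .rsp - 80).toNat ≤ _ ∨ _ ≤ (u.reg .rsp - 80).toNat - 96
        u_omega
      rw [w_mem_10134c] at w_same hrk2 hpost_un
      have hm2 : MemInv u ret cmp w s_10134cr.mem := by
        refine hm'.step he_room he_top ?_ ?_ ?_ ?_
        · u_eqon
        · u_same
        · have h1 : ShadowUntouched s_10133dr.mem (s_10133dr.mem.writeLE (u.reg Reg.rsp - 80) 8 1053521) := by
            v_untouched
          exact Mem.EqOn.trans h1 hpost_un
        · have h1 : RecordsKept s_10133dr.mem (s_10133dr.mem.writeLE (u.reg Reg.rsp - 80) 8 1053521)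
              (u.reg .rdi).toNat w (u.reg .rdx).toNat := by
            refine RecordsKept.of_eqOn (by omega) ?_
            u_eqon
          exact h1.trans hrk2
      have hdf2 : s_10134cr.flags .df = false := (show abiInv _ from w_inv).1
      have hmx2 : s_10134cr.mxcsr &&& 0x1F80 = 0x1F80 := (show abiInv _ from w_inv).2
      have ⟨hsame2, hun2, hrk3, hs02, hs12, hs22, hs32, hs42, hs52, hs62, hs82⟩ := hm2
      u_walk hcode [hμ.vendor] until [Vorbis.L.sift_down.loop1, Vorbis.L.swap_bytes.entry] span [Vorbis.L.textLo, Vorbis.L.textHi] side (v_side)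
      -- the back edge 0x101351 → 0x101354: the invariant with root = c (the memory invariant is found by `u_loop_back` itself)
      u_loop_back [c]
      · -- root = child ≤ end
        omega
      · -- the direction flag (`mov` writes no flag)
        rw [w_flags]
        exact hdf2
      · -- the MXCSR masks
        rw [w_mxcsr]
        exact hmx2
      · -- the measure: `end − root` decreases, `root < child`
        have e1 : (UInt64.ofNat c).toNat = c := Code.toNat_ofNat_lt _ (by omega)
        have e2 : (UInt64.ofNat i).toNat = i := Code.toNat_ofNat_lt _ (by omega)
        rw [w_rbx, hi, e1, e2]
        omega
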